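-- pv_equiv track=rewrite | github.com/BuilderBenv1/brain-v | scripts/plant_vowel_analysis.py | split_skel_vowels
-- ===== SOURCE A (Python) =====
-- from collections import Counter, defaultdict
--
-- EVA_MAP = [
--     ("cth","tk"),("ckh","kk"),("cph","pk"),("ch","k"),("sh","s"),
--     ("k","k"),("d","d"),("r","r"),("s","s"),("l","l"),
--     ("n","n"),("y","y"),("m","m"),("g","g"),
--     ("t","t"),("p","p"),("f","s"),("q","w"),
-- ]
--
-- VOWELS = set("aoei")
--
-- def split_skel_vowels(word):
--     if word and word[0] in "tp" and (len(word) == 1 or word[1] != "h"):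
--         word = word[1:]
--     cons = []; vs = []; pos = 0; i = 0
--     while i < len(word):
--         matched = False
--         for ev, sy in EVA_MAP:
--             if word.startswith(ev, i):
--                 cons.append(sy); pos += 1; i += len(ev); matched = True; break
--         if not matched:
--             if word[i] in VOWELS: vs.append((pos, word[i]))
--             i += 1
--     if not vs:
--         return "".join(cons), ""
--     by_pos = defaultdict(list)
--     for p, v in vs: by_pos[p].append(v)
--     return "".join(cons), ".".join("".join(by_pos.get(p, [])) or "_"
--                                     for p in range(max(by_pos) + 1))
-- ===== SOURCE B (Python) =====
-- CLUSTERS3 = {"cth": "tk", "ckh": "kk", "cph": "pk"}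
-- CLUSTERS2 = {"ch": "k", "sh": "s"}
-- SINGLES = {"k": "k", "d": "d", "r": "r", "s": "s", "l": "l", "n": "n",
--            "y": "y", "m": "m", "g": "g", "t": "t", "p": "p", "f": "s", "q": "w"}
-- VOWELS = "aoei"
--
--
-- def split_skel_vowels(word):
--     # Same leading strip as the original.
--     if word and word[0] in "tp" and (len(word) == 1 or word[1] != "h"):
--         word = word[1:]
--     # Right-to-left scan.  EVA cluster occurrences never overlap (every key
--     # starts with 'c'/'s' and continues with 't'/'k'/'p'/'h'), so a cluster
--     # can be recognised by its *ending* position just as well as by its start.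
--     # Vowel slots are built directly, back to front: no position counter and
--     # no grouping pass is needed — a consonant seen to the LEFT of already
--     # collected slots simply shifts them by prepending (here: appending to the
--     # reversed slot list) one empty slot.
--     cons = []   # symbols, in reverse order
--     slots = []  # vowel slots, in reverse order; slots exist only up to the
--                 # last (rightmost) vowel, matching the original's truncation
--     i = len(word) - 1
--     while i >= 0:
--         c = word[i]
--         if i >= 2 and word[i - 2:i + 1] in CLUSTERS3:
--             cons.append(CLUSTERS3[word[i - 2:i + 1]])
--             if slots:
--                 slots.append("")
--             i -= 3
--         elif i >= 1 and word[i - 1:i + 1] in CLUSTERS2: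
--             cons.append(CLUSTERS2[word[i - 1:i + 1]])
--             if slots:
--                 slots.append("")
--             i -= 2
--         elif c in SINGLES:
--             cons.append(SINGLES[c])
--             if slots:
--                 slots.append("")
--             i -= 1
--         else:
--             if c in VOWELS:
--                 if slots:
--                     slots[-1] = c + slots[-1]
--                 else:
--                     slots = [c]
--             i -= 1
--     cons.reverse()
--     slots.reverse()
--     return "".join(cons), ".".join(s or "_" for s in slots)
-- ===== Notes on version B (the rewrite author's own statement) =====
-- stated objective: faster
-- what changed: B scans the word right-to-left, recognising EVA clusters by their ending position (key occurrences can never overlap) and building the vowel slot list directly back-to-front, so A's per-position 18-pattern startswith scan, position counter, positioned-vowel pair list, defaultdict grouping and range/max rendering pass all disappear.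
import Mathlib
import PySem

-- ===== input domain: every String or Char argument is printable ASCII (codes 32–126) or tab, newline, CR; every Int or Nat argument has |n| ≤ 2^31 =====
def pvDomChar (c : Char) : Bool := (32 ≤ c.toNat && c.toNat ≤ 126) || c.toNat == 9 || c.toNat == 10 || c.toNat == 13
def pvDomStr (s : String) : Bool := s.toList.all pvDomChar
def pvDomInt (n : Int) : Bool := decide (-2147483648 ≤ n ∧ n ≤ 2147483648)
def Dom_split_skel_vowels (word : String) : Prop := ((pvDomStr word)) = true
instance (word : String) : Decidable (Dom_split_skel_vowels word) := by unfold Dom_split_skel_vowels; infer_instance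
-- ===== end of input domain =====

-- B scans the word right-to-left, recognising EVA clusters by their ENDING position
-- (key occurrences can never overlap) and building the vowel slot list directly,
-- back to front, so A's position counter, positioned-vowel pair list, defaultdict
-- grouping and range/max rendering pass all disappear; same return value.

-- ===== PORT A =====
def evaMap : List (List Char × List Char) :=
  [(['c','t','h'],['t','k']), (['c','k','h'],['k','k']), (['c','p','h'],['p','k']),
   (['c','h'],['k']), (['s','h'],['s']),
   (['k'],['k']), (['d'],['d']), (['r'],['r']), (['s'],['s']), (['l'],['l']),
   (['n'],['n']), (['y'],['y']), (['m'],['m']), (['g'],['g']),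
   (['t'],['t']), (['p'],['p']), (['f'],['s']), (['q'],['w'])]

def vowelsA : PySem.Set Char := PySem.Set.ofList ['a','o','e','i']

-- the inner `for ev, sy in EVA_MAP: if word.startswith(ev, i): … break` loop:
-- first entry of the map whose key is a prefix of the remaining suffix
def scanEva : List (List Char × List Char) → List Char → Option (List Char × List Char)
  | [], _ => none
  | (ev, sy) :: t, rest => if ev.isPrefixOf rest then some (ev, sy) else scanEva t rest

-- needed by aLoop's termination proof
theorem scanEva_mem : ∀ (m : List (List Char × List Char)) (rest ev sy : List Char),
    scanEva m rest = some (ev, sy) → (ev, sy) ∈ m := by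
  intro m
  induction m with
  | nil => intro rest ev sy h; simp [scanEva] at h
  | cons p t ih =>
    intro rest ev sy h
    obtain ⟨pe, ps⟩ := p
    by_cases hp : pe.isPrefixOf rest
    · simp [scanEva, hp] at h; simp [h.1, h.2]
    · simp [scanEva, hp] at h; exact List.mem_cons_of_mem _ (ih rest ev sy h)

theorem scanEva_evaMap_pos (rest ev sy : List Char) (h : scanEva evaMap rest = some (ev, sy)) :
    0 < ev.length := by
  have hm := scanEva_mem evaMap rest ev sy h
  simp [evaMap] at hm
  rcases hm with h|h|h|h|h|h|h|h|h|h|h|h|h|h|h|h|h|h <;> simp [h.1]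

-- the outer while loop of A: greedy EVA match, else record vowel at current pos
def aLoop : List Char → List Char → List (Nat × Char) → Nat → List Char × List (Nat × Char)
  | [], cons, vs, _ => (cons, vs)
  | c :: rs, cons, vs, pos =>
    match h : scanEva evaMap (c :: rs) with
    | some (ev, sy) => aLoop ((c :: rs).drop ev.length) (cons ++ sy) vs (pos + 1)
    | none =>
      if c ∈ vowelsA then aLoop rs cons (vs ++ [(pos, c)]) pos
      else aLoop rs cons vs pos
  termination_by rest _ _ _ => rest.length
  decreasing_by
  · have := scanEva_evaMap_pos _ _ _ h
    simp; omega
  · simp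
  · simp

def split_skel_vowels (word : String) : String × String :=
  let cs := word.toList
  let cs := if cs ≠ [] ∧ (cs[0]? = some 't' ∨ cs[0]? = some 'p') ∧
               (cs.length = 1 ∨ cs[1]? ≠ some 'h')
            then cs.drop 1 else cs
  match aLoop cs [] [] 0 with
  | (cons, vs) =>
    if vs = [] then (String.ofList cons, "")
    else
      let byPos := vs.foldl (fun d pv => d.modify pv.1 [] (· ++ [pv.2]))
                     (PySem.Dict.empty : PySem.Dict Nat (List Char))
      -- max(by_pos): max over the dict's keys (nonempty here; the none arm is unreachable)
      let m := match PySem.List.max? byPos.keys (fun k => k) with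
               | some m => m
               | none => 0
      (String.ofList cons,
       PySem.Str.join "."
         ((List.range (m + 1)).map (fun p =>
            let s := byPos.getD p []
            if s = [] then "_" else String.ofList s)))

-- ===== PORT B =====
def singlesList : List (Char × Char) :=
  [('k','k'), ('d','d'), ('r','r'), ('s','s'), ('l','l'), ('n','n'),
   ('y','y'), ('m','m'), ('g','g'), ('t','t'), ('p','p'), ('f','s'), ('q','w')]

-- B's right-to-left while loop, on the REVERSED character list:
-- head h = word[i], t[0]? = word[i-1], t[1]? = word[i-2];
-- `word[i-2:i+1] in CLUSTERS3` = h='h' ∧ word[i-2]='c' ∧ word[i-1]∈{t,k,p}, etc.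
-- `cons.append(..)`/`slots.append("")` = `++ [..]` on the accumulators (reversed at the end).
def brev : List Char → List (List Char) → List (List Char) → List (List Char) × List (List Char)
  | [], cons, slots => (cons, slots)
  | h :: t, cons, slots =>
    if h = 'h' ∧ t[1]? = some 'c' ∧
         (t[0]? = some 't' ∨ t[0]? = some 'k' ∨ t[0]? = some 'p') then
      brev (t.drop 2) (cons ++ [[t.headD ' ', 'k']])
        (if slots = [] then slots else slots ++ [[]])
    else if h = 'h' ∧ (t[0]? = some 'c' ∨ t[0]? = some 's') then
      brev (t.drop 1) (cons ++ [[if t.headD ' ' = 'c' then 'k' else 's']])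
        (if slots = [] then slots else slots ++ [[]])
    else
      match singlesList.lookup h with
      | some sy =>
        brev t (cons ++ [[sy]]) (if slots = [] then slots else slots ++ [[]])
      | none =>
        if h ∈ ['a','o','e','i'] then
          brev t cons (if slots = [] then [[h]]
                       else slots.dropLast ++ [h :: slots.getLastD []])
        else brev t cons slots
  termination_by r _ _ => r.length
  decreasing_by all_goals (simp; try omega)

def split_skel_vowels_alt (word : String) : String × String :=
  let cs := word.toList
  let cs := if cs ≠ [] ∧ (cs[0]? = some 't' ∨ cs[0]? = some 'p') ∧
               (cs.length = 1 ∨ cs[1]? ≠ some 'h')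
            then cs.drop 1 else cs
  match brev cs.reverse [] [] with
  | (cons, slots) =>
    (String.ofList cons.reverse.flatten,
     PySem.Str.join "."
       (slots.reverse.map (fun s => if s = [] then "_" else String.ofList s)))

-- ===== PRECONDITION & SPEC =====
def Spec_split_skel_vowels (word : String) (out : String × String) : Prop := out = split_skel_vowels_alt word
instance (word : String) (out : String × String) : Decidable (Spec_split_skel_vowels word out) := by unfold Spec_split_skel_vowels; infer_instance

-- ===== CLAIM (what is proved, stated in full; the proofs are below) =====
def Claim_equal_split_skel_vowels : Prop := ∀ (word : String), Dom_split_skel_vowels word → Spec_split_skel_vowels word (split_skel_vowels word)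

-- ===== LEMMAS AND PROOFS =====

-- accumulator-free version of A's loop: token symbols + relative vowel positions
def aTok : List Char → List Char × List (Nat × Char)
  | [] => ([], [])
  | c :: rs =>
    match h : scanEva evaMap (c :: rs) with
    | some (ev, _sy) =>
      let r := aTok ((c :: rs).drop ev.length)
      (_sy ++ r.1, r.2.map (fun pv => (pv.1 + 1, pv.2)))
    | none =>
      let r := aTok rs
      if c ∈ vowelsA then (r.1, (0, c) :: r.2) else r
  termination_by rest => rest.length
  decreasing_by
  · have := scanEva_evaMap_pos _ _ _ h
    simp; omega
  · simp

-- number of consonant tokens A consumes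
def ctok : List Char → Nat
  | [] => 0
  | c :: rs =>
    match h : scanEva evaMap (c :: rs) with
    | some (ev, _sy) => ctok ((c :: rs).drop ev.length) + 1
    | none => ctok rs
  termination_by rest => rest.length
  decreasing_by
  · have := scanEva_evaMap_pos _ _ _ h
    simp; omega
  · simp

-- A's slot list as a function of the positioned-vowel list
def padUpdate (slots : List (List Char)) (pos : Nat) (c : Char) : List (List Char) :=
  let s := if slots.length ≤ pos then slots ++ List.replicate (pos + 1 - slots.length) []
           else slots
  s.set pos (s.getD pos [] ++ [c])

def grp (vs : List (Nat × Char)) : List (List Char) :=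
  vs.foldl (fun sl pv => padUpdate sl pv.1 pv.2) []

-- merging a relative (right-part) slot list L after n consonants onto S
def combine (S : List (List Char)) (n : Nat) (L : List (List Char)) : List (List Char) :=
  if L = [] then S
  else if S.length = n + 1 then S.dropLast ++ [(S.getLastD []) ++ L.headD []] ++ L.tail
  else S ++ List.replicate (n - S.length) [] ++ L

-- the step decision of A's inner scan, as a chain over the first char and two lookaheads
theorem scan_chain (c : Char) (rs : List Char) :
    scanEva evaMap (c :: rs) =
      if c = 'c' ∧ rs[1]? = some 'h' ∧
           (rs[0]? = some 't' ∨ rs[0]? = some 'k' ∨ rs[0]? = some 'p') then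
        some (['c', rs.headD ' ', 'h'], [rs.headD ' ', 'k'])
      else if c = 'c' ∧ rs[0]? = some 'h' then some (['c','h'], ['k'])
      else if c = 's' ∧ rs[0]? = some 'h' then some (['s','h'], ['s'])
      else (singlesList.lookup c).map (fun sy => ([c], [sy])) := by
  rcases rs with _ | ⟨a, _ | ⟨b, rs2⟩⟩
  · -- rs = []
    by_cases hcc : c = 'c'
    · subst hcc
      simp [scanEva, evaMap, singlesList, List.lookup]
    by_cases hcs : c = 's'
    · subst hcs
      simp [scanEva, evaMap, singlesList, List.lookup]
    by_cases hck : c = 'k'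
    · subst hck
      simp [scanEva, evaMap, singlesList, List.lookup]
    by_cases hcd : c = 'd'
    · subst hcd
      simp [scanEva, evaMap, singlesList, List.lookup]
    by_cases hcr : c = 'r'
    · subst hcr
      simp [scanEva, evaMap, singlesList, List.lookup]
    by_cases hcl : c = 'l'
    · subst hcl
      simp [scanEva, evaMap, singlesList, List.lookup]
    by_cases hcn : c = 'n'
    · subst hcn
      simp [scanEva, evaMap, singlesList, List.lookup]
    by_cases hcy : c = 'y'
    · subst hcy
      simp [scanEva, evaMap, singlesList, List.lookup]
    by_cases hcm : c = 'm'
    · subst hcm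
      simp [scanEva, evaMap, singlesList, List.lookup]
    by_cases hcg : c = 'g'
    · subst hcg
      simp [scanEva, evaMap, singlesList, List.lookup]
    by_cases hct : c = 't'
    · subst hct
      simp [scanEva, evaMap, singlesList, List.lookup]
    by_cases hcp : c = 'p'
    · subst hcp
      simp [scanEva, evaMap, singlesList, List.lookup]
    by_cases hcf : c = 'f'
    · subst hcf
      simp [scanEva, evaMap, singlesList, List.lookup]
    by_cases hcq : c = 'q'
    · subst hcq
      simp [scanEva, evaMap, singlesList, List.lookup]
    have n0 : ¬ 'c' = c := fun h => hcc h.symm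
    have p0 : (c == 'c') = false := beq_eq_false_iff_ne.2 hcc
    have q0 : ('c' == c) = false := beq_eq_false_iff_ne.2 n0
    have n1 : ¬ 's' = c := fun h => hcs h.symm
    have p1 : (c == 's') = false := beq_eq_false_iff_ne.2 hcs
    have q1 : ('s' == c) = false := beq_eq_false_iff_ne.2 n1
    have n2 : ¬ 'k' = c := fun h => hck h.symm
    have p2 : (c == 'k') = false := beq_eq_false_iff_ne.2 hck
    have q2 : ('k' == c) = false := beq_eq_false_iff_ne.2 n2
    have n3 : ¬ 'd' = c := fun h => hcd h.symm
    have p3 : (c == 'd') = false := beq_eq_false_iff_ne.2 hcd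
    have q3 : ('d' == c) = false := beq_eq_false_iff_ne.2 n3
    have n4 : ¬ 'r' = c := fun h => hcr h.symm
    have p4 : (c == 'r') = false := beq_eq_false_iff_ne.2 hcr
    have q4 : ('r' == c) = false := beq_eq_false_iff_ne.2 n4
    have n5 : ¬ 'l' = c := fun h => hcl h.symm
    have p5 : (c == 'l') = false := beq_eq_false_iff_ne.2 hcl
    have q5 : ('l' == c) = false := beq_eq_false_iff_ne.2 n5
    have n6 : ¬ 'n' = c := fun h => hcn h.symm
    have p6 : (c == 'n') = false := beq_eq_false_iff_ne.2 hcn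
    have q6 : ('n' == c) = false := beq_eq_false_iff_ne.2 n6
    have n7 : ¬ 'y' = c := fun h => hcy h.symm
    have p7 : (c == 'y') = false := beq_eq_false_iff_ne.2 hcy
    have q7 : ('y' == c) = false := beq_eq_false_iff_ne.2 n7
    have n8 : ¬ 'm' = c := fun h => hcm h.symm
    have p8 : (c == 'm') = false := beq_eq_false_iff_ne.2 hcm
    have q8 : ('m' == c) = false := beq_eq_false_iff_ne.2 n8
    have n9 : ¬ 'g' = c := fun h => hcg h.symm
    have p9 : (c == 'g') = false := beq_eq_false_iff_ne.2 hcg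
    have q9 : ('g' == c) = false := beq_eq_false_iff_ne.2 n9
    have n10 : ¬ 't' = c := fun h => hct h.symm
    have p10 : (c == 't') = false := beq_eq_false_iff_ne.2 hct
    have q10 : ('t' == c) = false := beq_eq_false_iff_ne.2 n10
    have n11 : ¬ 'p' = c := fun h => hcp h.symm
    have p11 : (c == 'p') = false := beq_eq_false_iff_ne.2 hcp
    have q11 : ('p' == c) = false := beq_eq_false_iff_ne.2 n11
    have n12 : ¬ 'f' = c := fun h => hcf h.symm
    have p12 : (c == 'f') = false := beq_eq_false_iff_ne.2 hcf
    have q12 : ('f' == c) = false := beq_eq_false_iff_ne.2 n12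
    have n13 : ¬ 'q' = c := fun h => hcq h.symm
    have p13 : (c == 'q') = false := beq_eq_false_iff_ne.2 hcq
    have q13 : ('q' == c) = false := beq_eq_false_iff_ne.2 n13
    simp [scanEva, evaMap, singlesList, List.lookup, hcc, n0, p0, q0, hcs, n1, p1, q1, hck, n2, p2, q2, hcd, n3, p3, q3, hcr, n4, p4, q4, hcl, n5, p5, q5, hcn, n6, p6, q6, hcy, n7, p7, q7, hcm, n8, p8, q8, hcg, n9, p9, q9, hct, n10, p10, q10, hcp, n11, p11, q11, hcf, n12, p12, q12, hcq, n13, p13, q13]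
  · -- rs = [a]
    by_cases hcc : c = 'c'
    · subst hcc
      by_cases hah : a = 'h'
      · subst hah; simp [scanEva, evaMap, singlesList, List.lookup]
      have na : ¬ 'h' = a := fun h => hah h.symm
      simp [scanEva, evaMap, singlesList, List.lookup, hah, na]
    by_cases hcs : c = 's'
    · subst hcs
      by_cases hah : a = 'h'
      · subst hah; simp [scanEva, evaMap, singlesList, List.lookup]
      have na : ¬ 'h' = a := fun h => hah h.symm
      simp [scanEva, evaMap, singlesList, List.lookup, hah, na]
    by_cases hck : c = 'k'
    · subst hck
      simp [scanEva, evaMap, singlesList, List.lookup]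
    by_cases hcd : c = 'd'
    · subst hcd
      simp [scanEva, evaMap, singlesList, List.lookup]
    by_cases hcr : c = 'r'
    · subst hcr
      simp [scanEva, evaMap, singlesList, List.lookup]
    by_cases hcl : c = 'l'
    · subst hcl
      simp [scanEva, evaMap, singlesList, List.lookup]
    by_cases hcn : c = 'n'
    · subst hcn
      simp [scanEva, evaMap, singlesList, List.lookup]
    by_cases hcy : c = 'y'
    · subst hcy
      simp [scanEva, evaMap, singlesList, List.lookup]
    by_cases hcm : c = 'm'
    · subst hcm
      simp [scanEva, evaMap, singlesList, List.lookup]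
    by_cases hcg : c = 'g'
    · subst hcg
      simp [scanEva, evaMap, singlesList, List.lookup]
    by_cases hct : c = 't'
    · subst hct
      simp [scanEva, evaMap, singlesList, List.lookup]
    by_cases hcp : c = 'p'
    · subst hcp
      simp [scanEva, evaMap, singlesList, List.lookup]
    by_cases hcf : c = 'f'
    · subst hcf
      simp [scanEva, evaMap, singlesList, List.lookup]
    by_cases hcq : c = 'q'
    · subst hcq
      simp [scanEva, evaMap, singlesList, List.lookup]
    have n0 : ¬ 'c' = c := fun h => hcc h.symm
    have p0 : (c == 'c') = false := beq_eq_false_iff_ne.2 hcc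
    have q0 : ('c' == c) = false := beq_eq_false_iff_ne.2 n0
    have n1 : ¬ 's' = c := fun h => hcs h.symm
    have p1 : (c == 's') = false := beq_eq_false_iff_ne.2 hcs
    have q1 : ('s' == c) = false := beq_eq_false_iff_ne.2 n1
    have n2 : ¬ 'k' = c := fun h => hck h.symm
    have p2 : (c == 'k') = false := beq_eq_false_iff_ne.2 hck
    have q2 : ('k' == c) = false := beq_eq_false_iff_ne.2 n2
    have n3 : ¬ 'd' = c := fun h => hcd h.symm
    have p3 : (c == 'd') = false := beq_eq_false_iff_ne.2 hcd
    have q3 : ('d' == c) = false := beq_eq_false_iff_ne.2 n3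
    have n4 : ¬ 'r' = c := fun h => hcr h.symm
    have p4 : (c == 'r') = false := beq_eq_false_iff_ne.2 hcr
    have q4 : ('r' == c) = false := beq_eq_false_iff_ne.2 n4
    have n5 : ¬ 'l' = c := fun h => hcl h.symm
    have p5 : (c == 'l') = false := beq_eq_false_iff_ne.2 hcl
    have q5 : ('l' == c) = false := beq_eq_false_iff_ne.2 n5
    have n6 : ¬ 'n' = c := fun h => hcn h.symm
    have p6 : (c == 'n') = false := beq_eq_false_iff_ne.2 hcn
    have q6 : ('n' == c) = false := beq_eq_false_iff_ne.2 n6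
    have n7 : ¬ 'y' = c := fun h => hcy h.symm
    have p7 : (c == 'y') = false := beq_eq_false_iff_ne.2 hcy
    have q7 : ('y' == c) = false := beq_eq_false_iff_ne.2 n7
    have n8 : ¬ 'm' = c := fun h => hcm h.symm
    have p8 : (c == 'm') = false := beq_eq_false_iff_ne.2 hcm
    have q8 : ('m' == c) = false := beq_eq_false_iff_ne.2 n8
    have n9 : ¬ 'g' = c := fun h => hcg h.symm
    have p9 : (c == 'g') = false := beq_eq_false_iff_ne.2 hcg
    have q9 : ('g' == c) = false := beq_eq_false_iff_ne.2 n9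
    have n10 : ¬ 't' = c := fun h => hct h.symm
    have p10 : (c == 't') = false := beq_eq_false_iff_ne.2 hct
    have q10 : ('t' == c) = false := beq_eq_false_iff_ne.2 n10
    have n11 : ¬ 'p' = c := fun h => hcp h.symm
    have p11 : (c == 'p') = false := beq_eq_false_iff_ne.2 hcp
    have q11 : ('p' == c) = false := beq_eq_false_iff_ne.2 n11
    have n12 : ¬ 'f' = c := fun h => hcf h.symm
    have p12 : (c == 'f') = false := beq_eq_false_iff_ne.2 hcf
    have q12 : ('f' == c) = false := beq_eq_false_iff_ne.2 n12
    have n13 : ¬ 'q' = c := fun h => hcq h.symm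
    have p13 : (c == 'q') = false := beq_eq_false_iff_ne.2 hcq
    have q13 : ('q' == c) = false := beq_eq_false_iff_ne.2 n13
    simp [scanEva, evaMap, singlesList, List.lookup, hcc, n0, p0, q0, hcs, n1, p1, q1, hck, n2, p2, q2, hcd, n3, p3, q3, hcr, n4, p4, q4, hcl, n5, p5, q5, hcn, n6, p6, q6, hcy, n7, p7, q7, hcm, n8, p8, q8, hcg, n9, p9, q9, hct, n10, p10, q10, hcp, n11, p11, q11, hcf, n12, p12, q12, hcq, n13, p13, q13]
  · -- rs = a :: b :: rs2
    by_cases hcc : c = 'c'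
    · subst hcc
      by_cases hbh : b = 'h'
      · subst hbh
        by_cases hat : a = 't'
        · subst hat; simp [scanEva, evaMap, singlesList, List.lookup]
        by_cases hak : a = 'k'
        · subst hak; simp [scanEva, evaMap, singlesList, List.lookup]
        by_cases hap : a = 'p'
        · subst hap; simp [scanEva, evaMap, singlesList, List.lookup]
        by_cases hah : a = 'h'
        · subst hah; simp [scanEva, evaMap, singlesList, List.lookup]
        have n0 : ¬ 't' = a := fun h => hat h.symm
        have n1 : ¬ 'k' = a := fun h => hak h.symm
        have n2 : ¬ 'p' = a := fun h => hap h.symm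
        have n3 : ¬ 'h' = a := fun h => hah h.symm
        simp [scanEva, evaMap, singlesList, List.lookup, hat, hak, hap, hah, n0, n1, n2, n3]
      have nb : ¬ 'h' = b := fun h => hbh h.symm
      by_cases hah : a = 'h'
      · subst hah; simp [scanEva, evaMap, singlesList, List.lookup, hbh, nb]
      have na : ¬ 'h' = a := fun h => hah h.symm
      simp [scanEva, evaMap, singlesList, List.lookup, hbh, nb, hah, na]
    by_cases hcs : c = 's'
    · subst hcs
      by_cases hah : a = 'h'
      · subst hah; simp [scanEva, evaMap, singlesList, List.lookup]
      have na : ¬ 'h' = a := fun h => hah h.symm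
      simp [scanEva, evaMap, singlesList, List.lookup, hah, na]
    by_cases hck : c = 'k'
    · subst hck
      simp [scanEva, evaMap, singlesList, List.lookup]
    by_cases hcd : c = 'd'
    · subst hcd
      simp [scanEva, evaMap, singlesList, List.lookup]
    by_cases hcr : c = 'r'
    · subst hcr
      simp [scanEva, evaMap, singlesList, List.lookup]
    by_cases hcl : c = 'l'
    · subst hcl
      simp [scanEva, evaMap, singlesList, List.lookup]
    by_cases hcn : c = 'n'
    · subst hcn
      simp [scanEva, evaMap, singlesList, List.lookup]
    by_cases hcy : c = 'y'
    · subst hcy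
      simp [scanEva, evaMap, singlesList, List.lookup]
    by_cases hcm : c = 'm'
    · subst hcm
      simp [scanEva, evaMap, singlesList, List.lookup]
    by_cases hcg : c = 'g'
    · subst hcg
      simp [scanEva, evaMap, singlesList, List.lookup]
    by_cases hct : c = 't'
    · subst hct
      simp [scanEva, evaMap, singlesList, List.lookup]
    by_cases hcp : c = 'p'
    · subst hcp
      simp [scanEva, evaMap, singlesList, List.lookup]
    by_cases hcf : c = 'f'
    · subst hcf
      simp [scanEva, evaMap, singlesList, List.lookup]
    by_cases hcq : c = 'q'
    · subst hcq
      simp [scanEva, evaMap, singlesList, List.lookup]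
    have n0 : ¬ 'c' = c := fun h => hcc h.symm
    have p0 : (c == 'c') = false := beq_eq_false_iff_ne.2 hcc
    have q0 : ('c' == c) = false := beq_eq_false_iff_ne.2 n0
    have n1 : ¬ 's' = c := fun h => hcs h.symm
    have p1 : (c == 's') = false := beq_eq_false_iff_ne.2 hcs
    have q1 : ('s' == c) = false := beq_eq_false_iff_ne.2 n1
    have n2 : ¬ 'k' = c := fun h => hck h.symm
    have p2 : (c == 'k') = false := beq_eq_false_iff_ne.2 hck
    have q2 : ('k' == c) = false := beq_eq_false_iff_ne.2 n2
    have n3 : ¬ 'd' = c := fun h => hcd h.symm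
    have p3 : (c == 'd') = false := beq_eq_false_iff_ne.2 hcd
    have q3 : ('d' == c) = false := beq_eq_false_iff_ne.2 n3
    have n4 : ¬ 'r' = c := fun h => hcr h.symm
    have p4 : (c == 'r') = false := beq_eq_false_iff_ne.2 hcr
    have q4 : ('r' == c) = false := beq_eq_false_iff_ne.2 n4
    have n5 : ¬ 'l' = c := fun h => hcl h.symm
    have p5 : (c == 'l') = false := beq_eq_false_iff_ne.2 hcl
    have q5 : ('l' == c) = false := beq_eq_false_iff_ne.2 n5
    have n6 : ¬ 'n' = c := fun h => hcn h.symm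
    have p6 : (c == 'n') = false := beq_eq_false_iff_ne.2 hcn
    have q6 : ('n' == c) = false := beq_eq_false_iff_ne.2 n6
    have n7 : ¬ 'y' = c := fun h => hcy h.symm
    have p7 : (c == 'y') = false := beq_eq_false_iff_ne.2 hcy
    have q7 : ('y' == c) = false := beq_eq_false_iff_ne.2 n7
    have n8 : ¬ 'm' = c := fun h => hcm h.symm
    have p8 : (c == 'm') = false := beq_eq_false_iff_ne.2 hcm
    have q8 : ('m' == c) = false := beq_eq_false_iff_ne.2 n8
    have n9 : ¬ 'g' = c := fun h => hcg h.symm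
    have p9 : (c == 'g') = false := beq_eq_false_iff_ne.2 hcg
    have q9 : ('g' == c) = false := beq_eq_false_iff_ne.2 n9
    have n10 : ¬ 't' = c := fun h => hct h.symm
    have p10 : (c == 't') = false := beq_eq_false_iff_ne.2 hct
    have q10 : ('t' == c) = false := beq_eq_false_iff_ne.2 n10
    have n11 : ¬ 'p' = c := fun h => hcp h.symm
    have p11 : (c == 'p') = false := beq_eq_false_iff_ne.2 hcp
    have q11 : ('p' == c) = false := beq_eq_false_iff_ne.2 n11
    have n12 : ¬ 'f' = c := fun h => hcf h.symm
    have p12 : (c == 'f') = false := beq_eq_false_iff_ne.2 hcf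
    have q12 : ('f' == c) = false := beq_eq_false_iff_ne.2 n12
    have n13 : ¬ 'q' = c := fun h => hcq h.symm
    have p13 : (c == 'q') = false := beq_eq_false_iff_ne.2 hcq
    have q13 : ('q' == c) = false := beq_eq_false_iff_ne.2 n13
    simp [scanEva, evaMap, singlesList, List.lookup, hcc, n0, p0, q0, hcs, n1, p1, q1, hck, n2, p2, q2, hcd, n3, p3, q3, hcr, n4, p4, q4, hcl, n5, p5, q5, hcn, n6, p6, q6, hcy, n7, p7, q7, hcm, n8, p8, q8, hcg, n9, p9, q9, hct, n10, p10, q10, hcp, n11, p11, q11, hcf, n12, p12, q12, hcq, n13, p13, q13]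


theorem scanEva_prefix : ∀ (m : List (List Char × List Char)) (rest ev sy : List Char),
    scanEva m rest = some (ev, sy) → ev.length ≤ rest.length := by
  intro m
  induction m with
  | nil => intro rest ev sy h; simp [scanEva] at h
  | cons p t ih =>
    intro rest ev sy h
    obtain ⟨pe, ps⟩ := p
    by_cases hp : pe.isPrefixOf rest
    · simp [scanEva, hp] at h
      obtain ⟨h1, h2⟩ := h
      subst h1
      exact (List.isPrefixOf_iff_prefix.mp hp).length_le
    · simp [scanEva, hp] at h; exact ih rest ev sy h

-- unfolding equations for the wf-recursive ports / helpers
theorem aLoop_cons_some (c : Char) (rs cons : List Char) (vs : List (Nat × Char))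
    (pos : Nat) (ev sy : List Char) (hscan : scanEva evaMap (c :: rs) = some (ev, sy)) :
    aLoop (c :: rs) cons vs pos =
      aLoop ((c :: rs).drop ev.length) (cons ++ sy) vs (pos + 1) := by
  rw [aLoop.eq_def]
  split <;> simp_all <;> split <;> simp_all

theorem aLoop_cons_none (c : Char) (rs cons : List Char) (vs : List (Nat × Char))
    (pos : Nat) (hscan : scanEva evaMap (c :: rs) = none) :
    aLoop (c :: rs) cons vs pos =
      if c ∈ vowelsA then aLoop rs cons (vs ++ [(pos, c)]) pos
      else aLoop rs cons vs pos := by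
  rw [aLoop.eq_def]
  split <;> simp_all <;> split <;> simp_all

theorem aTok_cons_some (c : Char) (rs : List Char)
    (ev sy : List Char) (hscan : scanEva evaMap (c :: rs) = some (ev, sy)) :
    aTok (c :: rs) =
      (sy ++ (aTok ((c :: rs).drop ev.length)).1,
       ((aTok ((c :: rs).drop ev.length)).2).map (fun pv => (pv.1 + 1, pv.2))) := by
  rw [aTok.eq_def]
  split <;> simp_all <;> split <;> simp_all

theorem aTok_cons_none (c : Char) (rs : List Char)
    (hscan : scanEva evaMap (c :: rs) = none) :
    aTok (c :: rs) =
      if c ∈ vowelsA then ((aTok rs).1, (0, c) :: (aTok rs).2) else aTok rs := by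
  rw [aTok.eq_def]
  split <;> simp_all <;> split <;> simp_all

theorem ctok_cons_some (c : Char) (rs : List Char)
    (ev sy : List Char) (hscan : scanEva evaMap (c :: rs) = some (ev, sy)) :
    ctok (c :: rs) = ctok ((c :: rs).drop ev.length) + 1 := by
  rw [ctok.eq_def]
  split <;> simp_all <;> split <;> simp_all

theorem ctok_cons_none (c : Char) (rs : List Char)
    (hscan : scanEva evaMap (c :: rs) = none) :
    ctok (c :: rs) = ctok rs := by
  rw [ctok.eq_def]
  split <;> simp_all <;> split <;> simp_all

-- A's loop with accumulators = accumulator-free tokenisation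
theorem aLoop_eq_aTok_aux : ∀ (n : Nat) (s : List Char), s.length ≤ n →
    ∀ cons vs pos, aLoop s cons vs pos =
      (cons ++ (aTok s).1, vs ++ (aTok s).2.map (fun pv => (pv.1 + pos, pv.2))) := by
  intro n
  induction n with
  | zero =>
    intro s hlen cons vs pos
    have h0 : s = [] := by cases s <;> simp_all
    subst h0; simp [aLoop, aTok]
  | succ n ih =>
    intro s hlen cons vs pos
    cases s with
    | nil => simp [aLoop, aTok]
    | cons c rs =>
      rcases hscan : scanEva evaMap (c :: rs) with _ | ⟨ev, sy⟩
      · rw [aLoop_cons_none c rs cons vs pos hscan, aTok_cons_none c rs hscan]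
        by_cases hv : c ∈ vowelsA
        · rw [if_pos hv, if_pos hv, ih rs (by simp at hlen ⊢; omega)]
          simp
        · rw [if_neg hv, if_neg hv, ih rs (by simp at hlen ⊢; omega)]
      · rw [aLoop_cons_some c rs cons vs pos ev sy hscan, aTok_cons_some c rs ev sy hscan]
        have hev := scanEva_evaMap_pos _ _ _ hscan
        rw [ih ((c :: rs).drop ev.length) (by simp at hlen ⊢; omega)]
        have hmap : ∀ l : List (Nat × Char),
            (l.map (fun pv => (pv.1 + 1, pv.2))).map (fun pv => (pv.1 + pos, pv.2)) =
            l.map (fun pv => (pv.1 + (pos + 1), pv.2)) := by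
          intro l
          simp only [List.map_map]
          apply List.map_congr_left
          intro pv _
          simp [Function.comp]
          omega
        simp [hmap]

-- the "no key ends here" side condition for appending a plain 'h'
def HsNoKeyEnd (s : List Char) : Prop :=
  ¬(s.reverse[0]? = some 'c' ∨ s.reverse[0]? = some 's' ∨
    (s.reverse[1]? = some 'c' ∧
      (s.reverse[0]? = some 't' ∨ s.reverse[0]? = some 'k' ∨ s.reverse[0]? = some 'p')))

theorem HsNoKeyEnd_drop (s : List Char) (n : Nat) (h : HsNoKeyEnd s) :
    HsNoKeyEnd (s.drop n) := by
  unfold HsNoKeyEnd at *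
  rw [List.reverse_drop]
  simp only [List.getElem?_take]
  split_ifs <;> simp_all

-- appending u past the scan position does not change the front match
theorem scan_app (c : Char) (rs u : List Char)
    (hA : rs = [] → ((c = 'c' ∨ c = 's') → u[0]? ≠ some 'h') ∧
          (c = 'c' → u[1]? = some 'h' →
            ¬(u[0]? = some 't' ∨ u[0]? = some 'k' ∨ u[0]? = some 'p')))
    (hB : ∀ x0, rs = [x0] → c = 'c' → (x0 = 't' ∨ x0 = 'k' ∨ x0 = 'p') →
            u[0]? ≠ some 'h') :
    scanEva evaMap (c :: (rs ++ u)) = scanEva evaMap (c :: rs) := by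
  rcases rs with _ | ⟨x0, _ | ⟨x1, rest⟩⟩
  · obtain ⟨h1, h2⟩ := hA rfl
    rw [List.nil_append, scan_chain, scan_chain]
    rw [if_neg, if_neg, if_neg]
    · simp
    · rintro ⟨hc, hh⟩
      exact h1 (Or.inr hc) hh
    · rintro ⟨hc, hh⟩
      exact h1 (Or.inl hc) hh
    · rintro ⟨hc, hh, hx⟩
      exact h2 hc hh hx
  · have hb := hB x0 rfl
    rw [List.cons_append, List.nil_append, scan_chain, scan_chain]
    simp only [List.getElem?_cons_zero, List.getElem?_cons_succ, List.getElem?_nil,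
      List.headD_cons, Option.some.injEq, reduceCtorEq, false_and, and_false, if_false]
    rw [if_neg (by rintro ⟨hc, hh, hk⟩; exact hb hc hk hh :
        ¬(c = 'c' ∧ u[0]? = some 'h' ∧ (x0 = 't' ∨ x0 = 'k' ∨ x0 = 'p')))]
  · rw [List.cons_append, List.cons_append, scan_chain, scan_chain]
    simp


theorem aTok_nil : aTok [] = ([], []) := by
  rw [aTok.eq_def]

theorem ctok_nil : ctok [] = 0 := by
  rw [ctok.eq_def]

-- appending one consonant unit u (a 3-key, a 2-key or a single) past the end
theorem aTok_app_gen (u : List Char) (C : List Char)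
    (hbase1 : aTok u = (C, [])) (hbase2 : ctok u = 1)
    (hu1 : u[0]? ≠ some 'h')
    (hu2 : u[1]? = some 'h' → ¬(u[0]? = some 't' ∨ u[0]? = some 'k' ∨ u[0]? = some 'p')) :
    ∀ (n : Nat) (s : List Char), s.length ≤ n →
      aTok (s ++ u) = ((aTok s).1 ++ C, (aTok s).2) ∧ ctok (s ++ u) = ctok s + 1 := by
  intro n
  induction n with
  | zero =>
    intro s hlen
    have h0 : s = [] := by cases s <;> simp_all
    subst h0
    simp [aTok_nil, ctok_nil, hbase1, hbase2]
  | succ n ih =>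
    intro s hlen
    cases s with
    | nil => simp [aTok_nil, ctok_nil, hbase1, hbase2]
    | cons c rs =>
      have hsc : scanEva evaMap (c :: (rs ++ u)) = scanEva evaMap (c :: rs) :=
        scan_app c rs u (fun _ => ⟨fun _ => hu1, fun _ hh => hu2 hh⟩)
          (fun _ _ _ _ => hu1)
      rcases hscan : scanEva evaMap (c :: rs) with _ | ⟨ev, sy⟩
      · have hscan' : scanEva evaMap (c :: (rs ++ u)) = none := by rw [hsc, hscan]
        obtain ⟨ih1, ih2⟩ := ih rs (by simp at hlen ⊢; omega)
        rw [List.cons_append, aTok_cons_none _ _ hscan', aTok_cons_none _ _ hscan,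
          ctok_cons_none _ _ hscan', ctok_cons_none _ _ hscan]
        by_cases hv : c ∈ vowelsA
        · simp [hv, ih1, ih2]
        · simp [hv, ih1, ih2]
      · have hscan' : scanEva evaMap (c :: (rs ++ u)) = some (ev, sy) := by rw [hsc, hscan]
        have hevlen : ev.length ≤ (c :: rs).length := scanEva_prefix _ _ _ _ hscan
        have hevpos := scanEva_evaMap_pos _ _ _ hscan
        have hdrop : (c :: (rs ++ u)).drop ev.length = ((c :: rs).drop ev.length) ++ u := by
          rw [← List.cons_append, List.drop_append_of_le_length hevlen]
        obtain ⟨ih1, ih2⟩ := ih ((c :: rs).drop ev.length)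
          (by simp at hlen ⊢; omega)
        rw [List.cons_append, aTok_cons_some _ _ _ _ hscan', ctok_cons_some _ _ _ _ hscan',
          hdrop, ih1, ih2, aTok_cons_some _ _ _ _ hscan, ctok_cons_some _ _ _ _ hscan]
        exact ⟨by simp, rfl⟩

-- appending a vowel past the end
theorem aTok_appV (v : Char) (hv : v ∈ (['a','o','e','i'] : List Char)) :
    ∀ (n : Nat) (s : List Char), s.length ≤ n →
      aTok (s ++ [v]) = ((aTok s).1, (aTok s).2 ++ [(ctok s, v)]) ∧
      ctok (s ++ [v]) = ctok s := by
  have hv' : v = 'a' ∨ v = 'o' ∨ v = 'e' ∨ v = 'i' := by simpa using hv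
  have hvh : v ≠ 'h' := by rcases hv' with h|h|h|h <;> subst h <;> decide
  have hu1 : ([v] : List Char)[0]? ≠ some 'h' := by simpa using hvh
  have hscan0 : scanEva evaMap [v] = none := by
    rcases hv' with h|h|h|h <;> subst h <;> decide
  have hbase1 : aTok [v] = ([], [(0, v)]) := by
    rw [aTok_cons_none _ _ hscan0]
    have : v ∈ vowelsA := by
      rcases hv' with h|h|h|h <;> subst h <;> decide
    simp [this, aTok_nil]
  have hbase2 : ctok [v] = 0 := by
    rw [ctok_cons_none _ _ hscan0, ctok_nil]
  intro n
  induction n with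
  | zero =>
    intro s hlen
    have h0 : s = [] := by cases s <;> simp_all
    subst h0
    simp [aTok_nil, ctok_nil, hbase1, hbase2]
  | succ n ih =>
    intro s hlen
    cases s with
    | nil => simp [aTok_nil, ctok_nil, hbase1, hbase2]
    | cons c rs =>
      have hsc : scanEva evaMap (c :: (rs ++ [v])) = scanEva evaMap (c :: rs) :=
        scan_app c rs [v] (fun _ => ⟨fun _ => hu1, fun _ hh => by simp at hh⟩)
          (fun _ _ _ _ => hu1)
      rcases hscan : scanEva evaMap (c :: rs) with _ | ⟨ev, sy⟩
      · have hscan' : scanEva evaMap (c :: (rs ++ [v])) = none := by rw [hsc, hscan]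
        obtain ⟨ih1, ih2⟩ := ih rs (by simp at hlen ⊢; omega)
        rw [List.cons_append, aTok_cons_none _ _ hscan', aTok_cons_none _ _ hscan,
          ctok_cons_none _ _ hscan', ctok_cons_none _ _ hscan]
        by_cases hvow : c ∈ vowelsA
        · simp [hvow, ih1, ih2]
        · simp [hvow, ih1, ih2]
      · have hscan' : scanEva evaMap (c :: (rs ++ [v])) = some (ev, sy) := by rw [hsc, hscan]
        have hevlen : ev.length ≤ (c :: rs).length := scanEva_prefix _ _ _ _ hscan
        have hevpos := scanEva_evaMap_pos _ _ _ hscan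
        have hdrop : (c :: (rs ++ [v])).drop ev.length = ((c :: rs).drop ev.length) ++ [v] := by
          rw [← List.cons_append, List.drop_append_of_le_length hevlen]
        obtain ⟨ih1, ih2⟩ := ih ((c :: rs).drop ev.length)
          (by simp at hlen ⊢; omega)
        rw [List.cons_append, aTok_cons_some _ _ _ _ hscan', ctok_cons_some _ _ _ _ hscan',
          hdrop, ih1, ih2, aTok_cons_some _ _ _ _ hscan, ctok_cons_some _ _ _ _ hscan]
        exact ⟨by simp, rfl⟩

-- appending any other character past the end (needs that no key can end at it)
theorem aTok_appO (d : Char) (h1 : singlesList.lookup d = none)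
    (h2 : d ∉ (['a','o','e','i'] : List Char)) :
    ∀ (n : Nat) (s : List Char), s.length ≤ n → (d = 'h' → HsNoKeyEnd s) →
      aTok (s ++ [d]) = aTok s ∧ ctok (s ++ [d]) = ctok s := by
  have h2' : d ∉ vowelsA := by
    intro hc
    exact h2 (by simpa [vowelsA, PySem.Set.mem_ofList] using hc)
  have hbase1 : aTok [d] = ([], []) := by
    have hscan : scanEva evaMap [d] = none := by
      rw [scan_chain]
      simp [h1]
    rw [aTok_cons_none _ _ hscan]
    simp [h2', aTok_nil]
  have hbase2 : ctok [d] = 0 := by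
    have hscan : scanEva evaMap [d] = none := by
      rw [scan_chain]
      simp [h1]
    rw [ctok_cons_none _ _ hscan, ctok_nil]
  intro n
  induction n with
  | zero =>
    intro s hlen _
    have h0 : s = [] := by cases s <;> simp_all
    subst h0
    simp [aTok_nil, ctok_nil, hbase1, hbase2]
  | succ n ih =>
    intro s hlen hHs
    cases s with
    | nil => simp [aTok_nil, ctok_nil, hbase1, hbase2]
    | cons c rs =>
      have hsc : scanEva evaMap (c :: (rs ++ [d])) = scanEva evaMap (c :: rs) := by
        apply scan_app c rs [d]
        · intro hrs
          subst hrs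
          constructor
          · intro hcs hEq
            have hd : d = 'h' := by simpa using hEq
            have hH := hHs hd
            unfold HsNoKeyEnd at hH
            apply hH
            rcases hcs with h|h <;> simp [h]
          · intro _ hh
            simp at hh
        · intro x0 hrs hc hx0 hEq
          subst hrs
          have hd : d = 'h' := by simpa using hEq
          have hH := hHs hd
          unfold HsNoKeyEnd at hH
          apply hH
          simp [hc, hx0]
      rcases hscan : scanEva evaMap (c :: rs) with _ | ⟨ev, sy⟩
      · have hscan' : scanEva evaMap (c :: (rs ++ [d])) = none := by rw [hsc, hscan]
        obtain ⟨ih1, ih2⟩ := ih rs (by simp at hlen ⊢; omega)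
          (fun hd => HsNoKeyEnd_drop (c :: rs) 1 (hHs hd))
        rw [List.cons_append, aTok_cons_none _ _ hscan', aTok_cons_none _ _ hscan,
          ctok_cons_none _ _ hscan', ctok_cons_none _ _ hscan]
        by_cases hvow : c ∈ vowelsA
        · simp [hvow, ih1, ih2]
        · simp [hvow, ih1, ih2]
      · have hscan' : scanEva evaMap (c :: (rs ++ [d])) = some (ev, sy) := by rw [hsc, hscan]
        have hevlen : ev.length ≤ (c :: rs).length := scanEva_prefix _ _ _ _ hscan
        have hevpos := scanEva_evaMap_pos _ _ _ hscan
        have hdrop : (c :: (rs ++ [d])).drop ev.length = ((c :: rs).drop ev.length) ++ [d] := by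
          rw [← List.cons_append, List.drop_append_of_le_length hevlen]
        obtain ⟨ih1, ih2⟩ := ih ((c :: rs).drop ev.length)
          (by simp at hlen ⊢; omega)
          (fun hd => HsNoKeyEnd_drop (c :: rs) ev.length (hHs hd))
        rw [List.cons_append, aTok_cons_some _ _ _ _ hscan', ctok_cons_some _ _ _ _ hscan',
          hdrop, ih1, ih2, aTok_cons_some _ _ _ _ hscan, ctok_cons_some _ _ _ _ hscan]
        exact ⟨rfl, rfl⟩

-- the three concrete consonant units
theorem aTok_key3 (x : Char) (hx : x = 't' ∨ x = 'k' ∨ x = 'p') (s : List Char) :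
    aTok (s ++ ['c', x, 'h']) = ((aTok s).1 ++ [x, 'k'], (aTok s).2) ∧
    ctok (s ++ ['c', x, 'h']) = ctok s + 1 := by
  have hscan : scanEva evaMap ('c' :: [x, 'h']) = some (['c', x, 'h'], [x, 'k']) := by
    rcases hx with h|h|h <;> subst h <;> decide
  refine aTok_app_gen ['c', x, 'h'] [x, 'k'] ?_ ?_ (by simp) ?_ s.length s le_rfl
  · rw [aTok_cons_some _ _ _ _ hscan]
    simp [aTok_nil]
  · rw [ctok_cons_some _ _ _ _ hscan]
    simp [ctok_nil]
  · intro _ hk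
    rcases hx with h|h|h <;> subst h <;> simp_all


theorem aTok_key2 (y sym : Char) (hy : (y = 'c' ∧ sym = 'k') ∨ (y = 's' ∧ sym = 's'))
    (s : List Char) :
    aTok (s ++ [y, 'h']) = ((aTok s).1 ++ [sym], (aTok s).2) ∧
    ctok (s ++ [y, 'h']) = ctok s + 1 := by
  have hscan : scanEva evaMap (y :: ['h']) = some ([y, 'h'], [sym]) := by
    rcases hy with ⟨h1, h2⟩ | ⟨h1, h2⟩ <;> subst h1 <;> subst h2 <;> decide
  refine aTok_app_gen [y, 'h'] [sym] ?_ ?_ ?_ ?_ s.length s le_rfl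
  · rw [aTok_cons_some _ _ _ _ hscan]
    simp [aTok_nil]
  · rw [ctok_cons_some _ _ _ _ hscan]
    simp [ctok_nil]
  · rcases hy with ⟨h1, _⟩ | ⟨h1, _⟩ <;> subst h1 <;> simp
  · intro _ hk
    rcases hy with ⟨h1, _⟩ | ⟨h1, _⟩ <;> subst h1 <;> simp_all
theorem aTok_single (d sy : Char) (hd : singlesList.lookup d = some sy) (s : List Char) :
    aTok (s ++ [d]) = ((aTok s).1 ++ [sy], (aTok s).2) ∧
    ctok (s ++ [d]) = ctok s + 1 := by
  have hdh : d ≠ 'h' := by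
    intro e
    subst e
    simp [singlesList, List.lookup] at hd
  have hscan : scanEva evaMap [d] = some ([d], [sy]) := by
    rw [scan_chain]
    simp [hd]
  refine aTok_app_gen [d] [sy] ?_ ?_ (by simpa using hdh) ?_ s.length s le_rfl
  · rw [aTok_cons_some _ _ _ _ hscan]
    simp [aTok_nil]
  · rw [ctok_cons_some _ _ _ _ hscan]
    simp [ctok_nil]
  · intro hk
    simp at hk

-- every recorded vowel position stays below the consonant-token count
theorem aTok_pos_le : ∀ (n : Nat) (s : List Char), s.length ≤ n →
    ∀ pv ∈ (aTok s).2, pv.1 ≤ ctok s := by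
  intro n
  induction n with
  | zero =>
    intro s hlen pv hpv
    have h0 : s = [] := by cases s <;> simp_all
    subst h0
    simp [aTok_nil] at hpv
  | succ n ih =>
    intro s hlen pv hpv
    cases s with
    | nil => simp [aTok_nil] at hpv
    | cons c rs =>
      rcases hscan : scanEva evaMap (c :: rs) with _ | ⟨ev, sy⟩
      · rw [aTok_cons_none _ _ hscan] at hpv
        rw [ctok_cons_none _ _ hscan]
        by_cases hv : c ∈ vowelsA
        · rw [if_pos hv] at hpv
          simp only at hpv
          rcases List.mem_cons.mp hpv with h | h
          · subst h; simp
          · exact ih rs (by simp at hlen ⊢; omega) pv h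
        · rw [if_neg hv] at hpv
          exact ih rs (by simp at hlen ⊢; omega) pv hpv
      · have hevpos := scanEva_evaMap_pos _ _ _ hscan
        rw [aTok_cons_some _ _ _ _ hscan] at hpv
        rw [ctok_cons_some _ _ _ _ hscan]
        simp only [List.mem_map] at hpv
        obtain ⟨qv, hqv, hq⟩ := hpv
        have := ih ((c :: rs).drop ev.length) (by simp at hlen ⊢; omega) qv hqv
        subst hq
        simpa using this


theorem grp_append (vs : List (Nat × Char)) (p : Nat) (v : Char) :
    grp (vs ++ [(p, v)]) = padUpdate (grp vs) p v := by
  simp [grp, List.foldl_append]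

theorem length_padUpdate (sl : List (List Char)) (p : Nat) (c : Char) :
    (padUpdate sl p c).length = max sl.length (p + 1) := by
  simp [padUpdate]; split <;> simp <;> omega

theorem getD_padUpdate (sl : List (List Char)) (p : Nat) (c : Char) (i : Nat) :
    (padUpdate sl p c).getD i [] = if i = p then sl.getD p [] ++ [c] else sl.getD i [] := by
  unfold padUpdate
  by_cases hlen : sl.length ≤ p
  · simp only [if_pos hlen, List.getD_eq_getElem?_getD, List.getElem?_set]
    have hp : sl[p]? = none := by simp; omega
    by_cases hip : i = p
    · subst hip
      simp [List.getElem?_append, List.getElem?_replicate, hp]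
      split_ifs <;> simp_all <;> omega
    · rw [if_neg (fun h => hip h.symm), if_neg hip]
      by_cases hil : i < sl.length
      · simp [List.getElem?_append, hil]
      · have h2 : sl[i]? = none := by simp; omega
        simp [h2, List.getElem?_append_right (by omega : sl.length ≤ i), List.getElem?_replicate]
        split <;> simp
  · simp only [if_neg hlen, List.getD_eq_getElem?_getD, List.getElem?_set]
    by_cases hip : i = p
    · subst hip; simp [Nat.lt_of_not_le hlen]
    · rw [if_neg (fun h => hip h.symm), if_neg hip]

theorem getD_grp (vs : List (Nat × Char)) (i : Nat) :
    (grp vs).getD i [] = (vs.filter (·.1 == i)).map (·.2) := by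
  induction vs using List.reverseRecOn with
  | nil => simp [grp]
  | append_singleton vs pv ih =>
    obtain ⟨p0, v0⟩ := pv
    rw [grp_append, getD_padUpdate]
    by_cases h : i = p0
    · subst h
      rw [if_pos rfl, ih]
      simp [List.filter_append]
    · rw [if_neg h, ih]
      have hb : (p0 == i) = false := by
        simp [beq_iff_eq]; exact fun hh => h hh.symm
      simp [List.filter_append, hb]

theorem length_grp_le (vs : List (Nat × Char)) (b : Nat)
    (h : ∀ pv ∈ vs, pv.1 < b) : (grp vs).length ≤ b := by
  induction vs using List.reverseRecOn with
  | nil => simp [grp]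
  | append_singleton vs pv ih =>
    obtain ⟨p0, v0⟩ := pv
    rw [grp_append, length_padUpdate]
    have h1 := h (p0, v0) (by simp)
    have h2 : (grp vs).length ≤ b := ih (fun q hq => h q (by simp [hq]))
    omega

theorem length_grp_gt (vs : List (Nat × Char)) (pv : Nat × Char) (h : pv ∈ vs) :
    pv.1 < (grp vs).length := by
  induction vs using List.reverseRecOn with
  | nil => simp at h
  | append_singleton vs q ih =>
    obtain ⟨p0, v0⟩ := q
    rw [grp_append, length_padUpdate]
    rcases List.mem_append.1 h with h' | h'
    · have := ih h'; omega
    · simp at h'; subst h'; omega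

-- small list facts about last-element surgery
theorem dropLast_getLastD (S : List (List Char)) (hS : S ≠ []) :
    S.dropLast ++ [S.getLastD []] = S := by
  induction S using List.reverseRecOn with
  | nil => simp at hS
  | append_singleton S x _ => simp

theorem set_last (S : List (List Char)) (x : List Char) (n : Nat) (h : S.length = n + 1) :
    S.set n x = S.dropLast ++ [x] := by
  induction S using List.reverseRecOn with
  | nil => simp at h
  | append_singleton S y _ =>
    have hn : S.length = n := by simpa using h
    subst hn
    simp [List.set_append]

theorem getD_last (S : List (List Char)) (n : Nat) (h : S.length = n + 1) :
    S.getD n [] = S.getLastD [] := by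
  induction S using List.reverseRecOn with
  | nil => simp at h
  | append_singleton S y _ =>
    have hn : S.length = n := by simpa using h
    subst hn
    simp [List.getD_eq_getElem?_getD, List.getElem?_append_right]

-- padUpdate at the running position, written by cases on the current length
theorem padUpdate_full (S : List (List Char)) (n : Nat) (v : Char) (h : S.length = n + 1) :
    padUpdate S n v = S.dropLast ++ [S.getLastD [] ++ [v]] := by
  unfold padUpdate
  rw [if_neg (by omega)]
  rw [set_last S _ n h, getD_last S n h]

theorem padUpdate_pad (S : List (List Char)) (n : Nat) (v : Char) (h : S.length ≤ n) :
    padUpdate S n v = S ++ List.replicate (n - S.length) [] ++ [[v]] := by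
  unfold padUpdate
  rw [if_pos h]
  have hlen : (S ++ List.replicate (n + 1 - S.length) []).length = n + 1 := by
    simp; omega
  rw [set_last _ _ n hlen, getD_last _ n hlen]
  have hrep : n + 1 - S.length = (n - S.length) + 1 := by omega
  rw [hrep, List.replicate_succ']
  rw [← List.append_assoc]
  simp

-- combine after one consonant step of B
theorem combine_cons_step (S : List (List Char)) (n : Nat) (L : List (List Char))
    (h : S.length ≤ n + 1) :
    combine S n (if L = [] then [] else [] :: L) = combine S (n + 1) L := by
  by_cases hL : L = []
  · simp [combine, hL]
  · rw [if_neg hL]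
    unfold combine
    by_cases h1 : S.length = n + 1
    · have hS : S ≠ [] := by intro e; rw [e] at h1; simp at h1
      rw [if_neg (by simp : ¬(([] : List Char) :: L = [])), if_pos h1, if_neg hL,
        if_neg (by omega : ¬(S.length = n + 1 + 1))]
      rw [show n + 1 - S.length = 0 by omega]
      simp only [List.replicate_zero, List.append_nil, List.headD_cons, List.tail_cons]
      rw [List.append_assoc, ← List.append_assoc, dropLast_getLastD S hS]
    · rw [if_neg (by simp : ¬(([] : List Char) :: L = [])), if_neg h1, if_neg hL,
        if_neg (by omega : ¬(S.length = n + 1 + 1))]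
      have hrep : n + 1 - S.length = (n - S.length) + 1 := by omega
      rw [hrep, List.replicate_succ']
      simp

-- combine after one vowel step of B
theorem combine_vowel_step (S : List (List Char)) (n : Nat) (L : List (List Char)) (v : Char)
    (h : S.length ≤ n + 1) :
    combine S n (if L = [] then [[v]] else (v :: L.headD []) :: L.tail) =
    combine (padUpdate S n v) n L := by
  by_cases h1 : S.length = n + 1
  · have hS : S ≠ [] := by intro e; rw [e] at h1; simp at h1
    rw [padUpdate_full S n v h1]
    have hlen : (S.dropLast ++ [S.getLastD [] ++ [v]]).length = n + 1 := by
      simp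
      omega
    by_cases hL : L = []
    · subst hL
      unfold combine
      rw [if_pos rfl, if_neg (by simp : ¬([[v]] : List (List Char)) = []), if_pos h1]
      simp
    · rw [if_neg hL]
      unfold combine
      rw [if_neg (by simp), if_pos h1, if_neg hL, if_pos hlen]
      simp only [List.headD_cons, List.tail_cons]
      have hdl : (S.dropLast ++ [S.getLastD [] ++ [v]]).dropLast = S.dropLast := by simp
      have hgl : (S.dropLast ++ [S.getLastD [] ++ [v]]).getLastD [] = S.getLastD [] ++ [v] := by
        simp
      rw [hdl, hgl]
      simp
  · have h2 : S.length ≤ n := by omega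
    rw [padUpdate_pad S n v h2]
    have hlen2 : (S ++ List.replicate (n - S.length) [] ++ [[v]]).length = n + 1 := by
      simp; omega
    by_cases hL : L = []
    · subst hL
      unfold combine
      rw [if_pos rfl, if_neg (by simp : ¬([[v]] : List (List Char)) = []), if_neg h1]
      simp
    · rw [if_neg hL]
      unfold combine
      rw [if_neg (by simp), if_neg h1, if_neg hL, if_pos hlen2]
      have hdl : (S ++ List.replicate (n - S.length) [] ++ [[v]]).dropLast
          = S ++ List.replicate (n - S.length) [] := by
        simp
      have hgl : (S ++ List.replicate (n - S.length) [] ++ [[v]]).getLastD [] = [v] := by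
        simp
      rw [hdl, hgl]
      simp

theorem getLastD_eq_reverse_headD (l : List (List Char)) : l.getLastD [] = l.reverse.headD [] := by
  cases l using List.reverseRecOn <;> simp

theorem combine_nil_zero (L : List (List Char)) : combine [] 0 L = L := by
  unfold combine
  split_ifs with h h2
  · rw [h]
  · simp at h2
  · simp

theorem grp_nil : grp [] = [] := rfl

theorem grp_len_le (s : List Char) : (grp (aTok s).2).length ≤ ctok s + 1 :=
  length_grp_le _ _ (fun pv hpv => Nat.lt_succ_of_le (aTok_pos_le s.length s le_rfl pv hpv))

theorem brev_cons (h : Char) (t : List Char) (cons slots : List (List Char)) :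
    brev (h :: t) cons slots =
      if h = 'h' ∧ t[1]? = some 'c' ∧
           (t[0]? = some 't' ∨ t[0]? = some 'k' ∨ t[0]? = some 'p') then
        brev (t.drop 2) (cons ++ [[t.headD ' ', 'k']])
          (if slots = [] then slots else slots ++ [[]])
      else if h = 'h' ∧ (t[0]? = some 'c' ∨ t[0]? = some 's') then
        brev (t.drop 1) (cons ++ [[if t.headD ' ' = 'c' then 'k' else 's']])
          (if slots = [] then slots else slots ++ [[]])
      else
        match singlesList.lookup h with
        | some sy =>
          brev t (cons ++ [[sy]]) (if slots = [] then slots else slots ++ [[]])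
        | none =>
          if h ∈ ['a','o','e','i'] then
            brev t cons (if slots = [] then [[h]]
                         else slots.dropLast ++ [h :: slots.getLastD []])
          else brev t cons slots := by
  rw [brev.eq_def]

-- B's reversed-list loop computes A's tokenisation, with the slot list merged via combine
theorem brev_eq_aTok : ∀ (n : Nat) (r : List Char), r.length ≤ n →
    ∀ cons slots,
      (brev r cons slots).1.reverse.flatten = (aTok r.reverse).1 ++ cons.reverse.flatten ∧
      (brev r cons slots).2.reverse =
        combine (grp (aTok r.reverse).2) (ctok r.reverse) slots.reverse := by
  intro n
  induction n with
  | zero =>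
    intro r hlen cons slots
    have h0 : r = [] := by cases r <;> simp_all
    subst h0
    simp [brev, aTok_nil, ctok_nil, grp_nil, combine_nil_zero]
  | succ n ih =>
    intro r hlen cons slots
    cases r with
    | nil => simp [brev, aTok_nil, ctok_nil, grp_nil, combine_nil_zero]
    | cons h t =>
      rw [brev_cons]
      have hslc : (if slots = [] then slots else slots ++ [[]]).reverse =
          (if slots.reverse = [] then [] else [] :: slots.reverse) := by
        by_cases hs : slots = [] <;> simp [hs]
      by_cases hg3 : h = 'h' ∧ t[1]? = some 'c' ∧
          (t[0]? = some 't' ∨ t[0]? = some 'k' ∨ t[0]? = some 'p')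
      · obtain ⟨hh, h1, h0⟩ := hg3
        rcases t with _ | ⟨t0, _ | ⟨t1, t''⟩⟩
        · simp at h1
        · simp at h1
        · have ht1 : t1 = 'c' := by simpa using h1
          have ht0 : t0 = 't' ∨ t0 = 'k' ∨ t0 = 'p' := by simpa using h0
          subst hh
          subst ht1
          rw [if_pos ⟨rfl, by simp, by simpa using ht0⟩]
          simp only [List.headD_cons]
          obtain ⟨ih1, ih2⟩ := ih t'' (by simp at hlen ⊢; omega)
            (cons ++ [[t0, 'k']]) (if slots = [] then slots else slots ++ [[]])
          obtain ⟨hk1, hk2⟩ := aTok_key3 t0 ht0 t''.reverse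
          have hrev : ('h' :: t0 :: 'c' :: t'').reverse = t''.reverse ++ ['c', t0, 'h'] := by
            simp
          constructor
          · rw [show (t0 :: 'c' :: t'').drop 2 = t'' by rfl, ih1, hrev, hk1]
            simp
          · rw [show (t0 :: 'c' :: t'').drop 2 = t'' by rfl, ih2, hrev, hk1, hk2, hslc]
            exact combine_cons_step _ _ _ (grp_len_le t''.reverse)
      · rw [if_neg hg3]
        by_cases hg2 : h = 'h' ∧ (t[0]? = some 'c' ∨ t[0]? = some 's')
        · obtain ⟨hh, h0⟩ := hg2
          rcases t with _ | ⟨t0, t''⟩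
          · simp at h0
          · have ht0 : t0 = 'c' ∨ t0 = 's' := by simpa using h0
            subst hh
            rw [if_pos ⟨rfl, by simpa using ht0⟩]
            obtain ⟨ih1, ih2⟩ := ih t'' (by simp at hlen ⊢; omega)
              (cons ++ [[if (t0 :: t'').headD ' ' = 'c' then 'k' else 's']])
              (if slots = [] then slots else slots ++ [[]])
            have hrev : ('h' :: t0 :: t'').reverse = t''.reverse ++ [t0, 'h'] := by simp
            have hsym : ((t0 :: t'').headD ' ' = 'c' → t0 = 'c') := by simp
            obtain ⟨hk1, hk2⟩ := aTok_key2 t0 (if t0 = 'c' then 'k' else 's')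
              (by rcases ht0 with h|h <;> subst h <;> simp) t''.reverse
            have hsym2 : (if (t0 :: t'').headD ' ' = 'c' then 'k' else 's') =
                (if t0 = 'c' then 'k' else 's') := by simp
            constructor
            · rw [show (t0 :: t'').drop 1 = t'' by rfl, ih1, hrev, hk1, hsym2]
              simp
            · rw [show (t0 :: t'').drop 1 = t'' by rfl, ih2, hrev, hk1, hk2, hslc]
              exact combine_cons_step _ _ _ (grp_len_le t''.reverse)
        · rw [if_neg hg2]
          rcases hlk : singlesList.lookup h with _ | sy
          · by_cases hvw : h ∈ (['a','o','e','i'] : List Char)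
            · rw [if_pos hvw]
              obtain ⟨ih1, ih2⟩ := ih t (by simp at hlen ⊢; omega) cons
                (if slots = [] then [[h]]
                 else slots.dropLast ++ [h :: slots.getLastD []])
              obtain ⟨hk1, hk2⟩ := aTok_appV h hvw t.reverse.length t.reverse le_rfl
              have hslv : (if slots = [] then [[h]]
                  else slots.dropLast ++ [h :: slots.getLastD []]).reverse =
                  (if slots.reverse = [] then [[h]]
                   else (h :: slots.reverse.headD []) :: slots.reverse.tail) := by
                by_cases hs : slots = []
                · simp [hs]
                · rw [if_neg hs, if_neg (by simpa using hs)]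
                  rw [List.reverse_append]
                  rw [← getLastD_eq_reverse_headD, List.tail_reverse]
                  simp
              constructor
              · rw [ih1, List.reverse_cons, hk1]
              · rw [ih2, List.reverse_cons, hk1, hk2, hslv]
                rw [grp_append]
                exact combine_vowel_step _ _ _ _ (grp_len_le t.reverse)
            · rw [if_neg hvw]
              obtain ⟨ih1, ih2⟩ := ih t (by simp at hlen ⊢; omega) cons slots
              have hHs : h = 'h' → HsNoKeyEnd t.reverse := by
                intro hd
                unfold HsNoKeyEnd
                rw [List.reverse_reverse]
                rintro (hc | hc | ⟨hc1, hc2⟩)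
                · exact hg2 ⟨hd, Or.inl hc⟩
                · exact hg2 ⟨hd, Or.inr hc⟩
                · exact hg3 ⟨hd, hc1, hc2⟩
              obtain ⟨hk1, hk2⟩ := aTok_appO h hlk hvw t.reverse.length t.reverse le_rfl hHs
              constructor
              · rw [ih1, List.reverse_cons, hk1]
              · rw [ih2, List.reverse_cons, hk1, hk2]
          · obtain ⟨ih1, ih2⟩ := ih t (by simp at hlen ⊢; omega)
              (cons ++ [[sy]]) (if slots = [] then slots else slots ++ [[]])
            obtain ⟨hk1, hk2⟩ := aTok_single h sy hlk t.reverse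
            constructor
            · rw [ih1, List.reverse_cons, hk1]
              simp
            · rw [ih2, List.reverse_cons, hk1, hk2, hslc]
              exact combine_cons_step _ _ _ (grp_len_le t.reverse)


-- A's defaultdict + range/max rendering, as a map over the slot list
theorem render_eq (vs : List (Nat × Char)) (hvs : vs ≠ []) :
    (List.range ((match PySem.List.max?
        (vs.foldl (fun d pv => d.modify pv.1 [] (· ++ [pv.2]))
          (PySem.Dict.empty : PySem.Dict Nat (List Char))).keys (fun k => k) with
      | some m => m
      | none => 0) + 1)).map (fun p =>
        let s := (vs.foldl (fun d pv => d.modify pv.1 [] (· ++ [pv.2]))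
          (PySem.Dict.empty : PySem.Dict Nat (List Char))).getD p []
        if s = [] then "_" else String.ofList s) =
    (grp vs).map (fun s => if s = [] then "_" else String.ofList s) := by
  have hkeys : (vs.foldl (fun d pv => d.modify pv.1 [] (· ++ [pv.2]))
      (PySem.Dict.empty : PySem.Dict Nat (List Char))).keys =
      PySem.Set.ofList (vs.map (·.1)) := by
    rw [PySem.Dict.keys_foldl_modify_key vs (fun pv => pv.1)
      (d0 := []) (f := fun _ pv => (· ++ [pv.2]))]
    simp [PySem.Dict.keys_empty, PySem.Set.update_nil_left]
  have hgetD : ∀ p : Nat, (vs.foldl (fun d pv => d.modify pv.1 [] (· ++ [pv.2]))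
      (PySem.Dict.empty : PySem.Dict Nat (List Char))).getD p [] = (grp vs).getD p [] := by
    intro p
    rw [PySem.Dict.getD_foldl_modify_append, PySem.Dict.getD_empty, getD_grp]
    simp
  rcases hmax : PySem.List.max?
      (vs.foldl (fun d pv => d.modify pv.1 [] (· ++ [pv.2]))
        (PySem.Dict.empty : PySem.Dict Nat (List Char))).keys (fun k => k) with _ | m
  · exfalso
    rw [PySem.List.max?_eq_none_iff, hkeys] at hmax
    rcases vs with _ | ⟨pv, vs'⟩
    · exact hvs rfl
    · have : pv.1 ∈ PySem.Set.ofList (((pv :: vs')).map (·.1)) := by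
        rw [PySem.Set.mem_ofList]; simp
      rw [hmax] at this; simp at this
  · have hmem : m ∈ vs.map (·.1) := by
      have := PySem.List.max?_mem hmax
      rw [hkeys, PySem.Set.mem_ofList] at this
      exact this
    have hmax' : ∀ pv ∈ vs, pv.1 ≤ m := by
      intro pv hpv
      have := PySem.List.max?_isMax hmax pv.1 (by
        rw [hkeys, PySem.Set.mem_ofList]
        exact List.mem_map_of_mem hpv)
      exact this
    have hlen : (grp vs).length = m + 1 := by
      obtain ⟨pv, hpv, hpv1⟩ := List.mem_map.1 hmem
      have h1 : (grp vs).length ≤ m + 1 :=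
        length_grp_le vs (m + 1) (fun q hq => Nat.lt_succ_of_le (hmax' q hq))
      have h2 : m < (grp vs).length := hpv1 ▸ length_grp_gt vs pv hpv
      omega
    simp only [hmax]
    apply List.ext_getElem
    · simp [hlen]
    · intro i hi1 hi2
      simp only [List.getElem_map, List.getElem_range]
      rw [hgetD]
      have hi : i < (grp vs).length := by simp at hi2; omega
      rw [List.getD_eq_getElem?_getD, List.getElem?_eq_getElem hi]
      simp

-- ===== VERDICT (by name: the statement is the Claim_ definition above) =====
theorem split_skel_vowels_spec : Claim_equal_split_skel_vowels := by
  intro word _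
  unfold Spec_split_skel_vowels split_skel_vowels split_skel_vowels_alt
  dsimp only
  rcases ha : aTok (if word.toList ≠ [] ∧
      (word.toList[0]? = some 't' ∨ word.toList[0]? = some 'p') ∧
      (word.toList.length = 1 ∨ word.toList[1]? ≠ some 'h')
    then word.toList.drop 1 else word.toList) with ⟨C, V⟩
  have hA := aLoop_eq_aTok_aux (if word.toList ≠ [] ∧
      (word.toList[0]? = some 't' ∨ word.toList[0]? = some 'p') ∧
      (word.toList.length = 1 ∨ word.toList[1]? ≠ some 'h')
    then word.toList.drop 1 else word.toList).length _ le_rfl [] [] 0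
  rw [ha] at hA
  simp only [List.nil_append] at hA
  have hA' : aLoop (if word.toList ≠ [] ∧
      (word.toList[0]? = some 't' ∨ word.toList[0]? = some 'p') ∧
      (word.toList.length = 1 ∨ word.toList[1]? ≠ some 'h')
    then word.toList.drop 1 else word.toList) [] [] 0 = (C, V) := by
    rw [hA]
    congr 1
    have : ∀ l : List (Nat × Char), l.map (fun pv => (pv.1 + 0, pv.2)) = l := by
      intro l
      induction l with
      | nil => rfl
      | cons x xs ihx => simp [ihx]
    exact this V
  obtain ⟨hB1, hB2⟩ := brev_eq_aTok (if word.toList ≠ [] ∧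
      (word.toList[0]? = some 't' ∨ word.toList[0]? = some 'p') ∧
      (word.toList.length = 1 ∨ word.toList[1]? ≠ some 'h')
    then word.toList.drop 1 else word.toList).reverse.length _ le_rfl [] []
  rw [List.reverse_reverse, ha] at hB1 hB2
  simp only [List.reverse_nil, List.flatten_nil, List.append_nil] at hB1 hB2
  rcases hb : brev (if word.toList ≠ [] ∧
      (word.toList[0]? = some 't' ∨ word.toList[0]? = some 'p') ∧
      (word.toList.length = 1 ∨ word.toList[1]? ≠ some 'h')
    then word.toList.drop 1 else word.toList).reverse [] [] with ⟨BC, BS⟩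
  rw [hb] at hB1 hB2
  dsimp only at hB1 hB2 ⊢
  rw [hA', hB1]
  have hcomb : combine (grp V) (ctok (if word.toList ≠ [] ∧
      (word.toList[0]? = some 't' ∨ word.toList[0]? = some 'p') ∧
      (word.toList.length = 1 ∨ word.toList[1]? ≠ some 'h')
    then word.toList.drop 1 else word.toList)) ([] : List (List Char)) = grp V := by
    simp [combine]
  rw [hcomb] at hB2
  rw [hB2]
  by_cases hv : V = []
  · subst hv
    simp [grp_nil, PySem.Str.join]
  · rw [if_neg hv, render_eq V hv]
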